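-- pv_equiv track=rewrite | github.com/ShreyPatel4/solution_SnowConvertAI_final | snowconvert/make_loadable.py | _split_first_unquoted_dot
-- ===== SOURCE A (Python) =====
-- from typing import Callable, List, Optional, Tuple
--
-- def _split_first_unquoted_dot(s: str) -> Tuple[str, str]:
--     """Split s at the first unquoted dot. Returns (before, after)."""
--     in_quote = False
--     for i, c in enumerate(s):
--         if c == '"':
--             in_quote = not in_quote
--         elif c == "." and not in_quote:
--             return s[:i], s[i + 1 :]
--     return s, ""
-- ===== SOURCE B (Python) =====
-- def _split_first_unquoted_dot(s: str):
--     """Split s at the first unquoted dot. Returns (before, after)."""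
--     parts = s.split('"')
--     offset = 0
--     for j, part in enumerate(parts):
--         if j % 2 == 0 and '.' in part:
--             idx = offset + part.index('.')
--             return s[:idx], s[idx + 1:]
--         offset += len(part) + 1
--     return s, ''
-- ===== Notes on version B (the rewrite author's own statement) =====
-- stated objective: faster
-- what changed: Replaces the per-character quote-toggle scan with a decomposition: split the string on the quote character so even-indexed parts are the unquoted regions, then find the first even part containing a dot, locating the split position via a running offset (len(part)+1 per consumed part).
import Mathlib
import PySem

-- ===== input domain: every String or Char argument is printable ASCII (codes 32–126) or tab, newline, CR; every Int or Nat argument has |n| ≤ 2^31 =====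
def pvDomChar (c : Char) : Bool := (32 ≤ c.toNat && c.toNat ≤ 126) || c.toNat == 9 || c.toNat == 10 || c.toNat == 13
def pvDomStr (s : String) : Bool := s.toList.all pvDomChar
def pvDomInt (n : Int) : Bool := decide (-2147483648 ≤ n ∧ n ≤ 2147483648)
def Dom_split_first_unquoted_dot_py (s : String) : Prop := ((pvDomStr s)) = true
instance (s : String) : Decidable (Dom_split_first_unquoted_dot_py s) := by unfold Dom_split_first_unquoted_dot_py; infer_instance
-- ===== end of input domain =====

-- B replaces A's per-character quote-toggle scan by splitting on '"' and scanning the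
-- even-indexed (unquoted) parts with a running offset; same O(n) cost, different decomposition.

-- ===== PORT A =====
-- loop over the characters with index i and the in_quote flag; s[:i] and s[i+1:] with
-- 0 ≤ i are exactly List.take i and List.drop (i+1) of the characters.
def pvAgo (s : List Char) : List Char → Bool → Nat → String × String
  | [], _, _ => (String.ofList s, "")
  | c :: rest, q, i =>
    if c = '"' then pvAgo s rest (!q) (i + 1)
    else if c = '.' ∧ q = false then (String.ofList (s.take i), String.ofList (s.drop (i + 1)))
    else pvAgo s rest q (i + 1)

def split_first_unquoted_dot_py (s : String) : String × String :=
  pvAgo s.toList s.toList false 0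

-- ===== PORT B =====
-- s.split('"') with a one-character separator is List.splitOn '"' on the characters;
-- part.index('.') (guarded by '.' in part) is List.idxOf.
def pvBgo (s : List Char) : List (List Char) → Nat → Nat → String × String
  | [], _, _ => (String.ofList s, "")
  | p :: rest, j, off =>
    if j % 2 = 0 ∧ '.' ∈ p then
      (String.ofList (s.take (off + p.idxOf '.')), String.ofList (s.drop (off + p.idxOf '.' + 1)))
    else pvBgo s rest (j + 1) (off + p.length + 1)

def split_first_unquoted_dot_py_alt (s : String) : String × String :=
  pvBgo s.toList (s.toList.splitOn '"') 0 0

-- ===== PRECONDITION & SPEC =====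
def Spec_split_first_unquoted_dot_py (s : String) (out : String × String) : Prop := out = split_first_unquoted_dot_py_alt s
instance (s : String) (out : String × String) : Decidable (Spec_split_first_unquoted_dot_py s out) := by unfold Spec_split_first_unquoted_dot_py; infer_instance

-- ===== CLAIM (what is proved, stated in full; the proofs are below) =====
def Claim_equal_split_first_unquoted_dot_py : Prop := ∀ (s : String), Dom_split_first_unquoted_dot_py s → Spec_split_first_unquoted_dot_py s (split_first_unquoted_dot_py s)

-- ===== LEMMAS AND PROOFS =====

-- every piece produced by splitOnP is free of separator characters
theorem pv_mem_splitOnP (P : Char → Bool) :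
    ∀ (xs : List Char), ∀ p ∈ xs.splitOnP P, ∀ c ∈ p, ¬ P c := by
  intro xs
  induction xs with
  | nil => intro p hp c hc; simp [List.splitOnP_nil] at hp; subst hp; simp at hc
  | cons x xs ih =>
    intro p hp c hc
    rw [List.splitOnP_cons] at hp
    by_cases hPx : P x
    · simp [hPx] at hp
      rcases hp with h | h
      · subst h; simp at hc
      · exact ih p h c hc
    · simp [hPx] at hp
      rcases hrec : xs.splitOnP P with _ | ⟨h0, t⟩
      · exact absurd hrec (List.splitOnP_ne_nil _ _)
      · rw [hrec] at hp
        simp [List.modifyHead] at hp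
        rcases hp with h | h
        · subst h
          rcases List.mem_cons.mp hc with h2 | h2
          · subst h2; exact hPx
          · exact ih h0 (by rw [hrec]; exact List.mem_cons_self) c h2
        · exact ih p (by rw [hrec]; exact List.mem_cons_of_mem _ h) c hc

theorem pv_mem_splitOn (xs : List Char) : ∀ p ∈ xs.splitOn '"', ('"' : Char) ∉ p := by
  intro p hp hq
  exact pv_mem_splitOnP (· == '"') xs p hp '"' hq (by simp)

-- A's scan over a quote-free block that it skips entirely
theorem pvAgo_skip (s : List Char) :
    ∀ (p : List Char) (t : List Char) (q : Bool) (i : Nat),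
      ('"' : Char) ∉ p → (q = true ∨ ('.' : Char) ∉ p) →
      pvAgo s (p ++ t) q i = pvAgo s t q (i + p.length) := by
  intro p
  induction p with
  | nil => intro t q i _ _; simp
  | cons c p' ih =>
    intro t q i hq hd
    have hc : c ≠ '"' := fun h => hq (h ▸ List.mem_cons_self)
    have hnd : ¬(c = '.' ∧ q = false) := by
      rintro ⟨hcd, hqf⟩
      rcases hd with h | h
      · rw [h] at hqf; exact absurd hqf (by simp)
      · exact h (hcd ▸ List.mem_cons_self)
    show pvAgo s (c :: (p' ++ t)) q i = _
    rw [pvAgo, if_neg hc, if_neg hnd,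
      ih t q (i + 1) (fun h => hq (List.mem_cons_of_mem _ h))
        (hd.imp id (fun h hm => h (List.mem_cons_of_mem _ hm)))]
    congr 1
    simp [List.length_cons]; omega

-- A's scan over a quote-free block containing a dot, outside quotes
theorem pvAgo_dot (s : List Char) :
    ∀ (p : List Char) (t : List Char) (i : Nat),
      ('"' : Char) ∉ p → ('.' : Char) ∈ p →
      pvAgo s (p ++ t) false i =
        (String.ofList (s.take (i + p.idxOf '.')), String.ofList (s.drop (i + p.idxOf '.' + 1))) := by
  intro p
  induction p with
  | nil => intro t i _ hd; simp at hd
  | cons c p' ih =>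
    intro t i hq hd
    have hc : c ≠ '"' := fun h => hq (h ▸ List.mem_cons_self)
    by_cases hcd : c = '.'
    · subst hcd
      show pvAgo s ('.' :: (p' ++ t)) false i = _
      rw [pvAgo, if_neg hc, if_pos ⟨rfl, rfl⟩]
      simp
    · have hd' : ('.' : Char) ∈ p' := by
        rcases List.mem_cons.mp hd with h | h
        · exact absurd h.symm hcd
        · exact h
      show pvAgo s (c :: (p' ++ t)) false i = _
      rw [pvAgo, if_neg hc, if_neg (by rintro ⟨h, _⟩; exact hcd h),
        ih t (i + 1) (fun h => hq (List.mem_cons_of_mem _ h)) hd']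
      have : (c :: p').idxOf '.' = p'.idxOf '.' + 1 := by
        simp [hcd]
      rw [this]
      have e1 : i + 1 + List.idxOf '.' p' = i + (List.idxOf '.' p' + 1) := by omega
      rw [e1]

-- main correspondence: A's scan over the reassembled parts equals B's part loop
theorem pv_main (s : List Char) :
    ∀ (parts : List (List Char)) (j off : Nat) (q : Bool),
      (∀ p ∈ parts, ('"' : Char) ∉ p) → (q = decide (j % 2 = 1)) →
      pvAgo s (List.intercalate ['"'] parts) q off = pvBgo s parts j off := by
  intro parts
  induction parts with
  | nil => intro j off q _ _; simp [List.intercalate, pvAgo, pvBgo]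
  | cons p rest ih =>
    intro j off q hnq hparity
    have hnp : ('"' : Char) ∉ p := hnq p List.mem_cons_self
    by_cases hcond : j % 2 = 0 ∧ ('.' : Char) ∈ p
    · -- B returns here; A finds the dot inside p
      have hq0 : q = false := by
        rw [hparity]; simp; omega
      have hinter : List.intercalate ['"'] (p :: rest) =
          p ++ (if rest = [] then [] else '"' :: List.intercalate ['"'] rest) := by
        rcases rest with _ | ⟨r, t⟩
        · simp [List.intercalate]
        · simp [List.intercalate, List.intersperse]
      rw [hinter, hq0, pvAgo_dot s p _ off hnp hcond.2, pvBgo, if_pos hcond]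
    · rw [pvBgo, if_neg hcond]
      have hskip : q = true ∨ ('.' : Char) ∉ p := by
        by_cases hj : j % 2 = 0
        · right; exact fun h => hcond ⟨hj, h⟩
        · left; rw [hparity]; simp; omega
      rcases rest with _ | ⟨r, t⟩
      · have : List.intercalate ['"'] [p] = p ++ [] := by simp [List.intercalate]
        rw [this, pvAgo_skip s p [] q off hnp hskip]
        simp [pvAgo, pvBgo]
      · rw [show List.intercalate ['"'] (p :: r :: t) =
            p ++ ('"' :: List.intercalate ['"'] (r :: t)) by simp [List.intercalate, List.intersperse],
          pvAgo_skip s p _ q off hnp hskip]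
        rw [pvAgo, if_pos rfl]
        rw [ih (j + 1) (off + p.length + 1) (!q)
          (fun p' h => hnq p' (List.mem_cons_of_mem _ h))
          (by rw [hparity]; rcases Nat.mod_two_eq_zero_or_one j with h | h <;>
              simp [h, Nat.add_mod])]

-- ===== VERDICT (by name: the statement is the Claim_ definition above) =====
theorem split_first_unquoted_dot_py_spec : Claim_equal_split_first_unquoted_dot_py := by
  intro s _
  show split_first_unquoted_dot_py s = split_first_unquoted_dot_py_alt s
  unfold split_first_unquoted_dot_py split_first_unquoted_dot_py_alt
  rw [← pv_main s.toList (s.toList.splitOn '"') 0 0 false (pv_mem_splitOn s.toList) (by decide)]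
  rw [List.intercalate_splitOn]
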